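-- pv_equiv track=rewrite | github.com/chrisimcevoy/pyoda-time | pyoda_time/_compatibility/_culture_data.py | __convert_icu_time_format_string
-- ===== SOURCE A (Python) =====
-- def __convert_icu_time_format_string(icu_format_string: str) -> str:
--     result = []
--     am_pm_added = False
--     i = 0
--
--     while i < len(icu_format_string):
--         current = icu_format_string[i]
--
--         if current == "'":  # Literal text markers
--             result.append(icu_format_string[i])
--             i += 1
--             while i < len(icu_format_string):
--                 current = icu_format_string[i]
--                 result.append(current)
--                 if current == "'":
--                     break
--                 i += 1
--
--         elif current in ":.Hhms \u00a0\u202f":  # Time format characters and spaces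
--             result.append(current)
--
--         elif current == "a":  # AM/PM marker
--             if not am_pm_added:
--                 am_pm_added = True
--                 result.extend(["t", "t"])
--         i += 1
--
--     return "".join(result)
-- ===== SOURCE B (Python) =====
-- def __convert_icu_time_format_string(icu_format_string: str) -> str:
--     # Split on quotes: even segments are plain format text, odd segments are quoted literals.
--     segments = icu_format_string.split("'")
--     parts = []
--     am_pm_added = False
--     outside = True
--     for k, seg in enumerate(segments):
--         last = k == len(segments) - 1
--         if outside:
--             for c in seg:
--                 if c in ":.Hhms \u00a0\u202f":
--                     parts.append(c)
--                 elif c == "a" and not am_pm_added: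
--                     am_pm_added = True
--                     parts.append("tt")
--         else:
--             parts.append(seg)
--         if not last:
--             parts.append("'")
--         outside = not outside
--     return "".join(parts)
-- ===== Notes on version B (the rewrite author's own statement) =====
-- stated objective: faster
-- what changed: Replaces A's per-character index-based while loop (with a nested inner quoted-literal scan) by one C-level str.split on quotes followed by a loop over the alternating plain/literal segments: plain segments are filtered char-by-char, literal segments are appended verbatim as whole strings, with quotes re-emitted between segments.
import Mathlib
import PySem

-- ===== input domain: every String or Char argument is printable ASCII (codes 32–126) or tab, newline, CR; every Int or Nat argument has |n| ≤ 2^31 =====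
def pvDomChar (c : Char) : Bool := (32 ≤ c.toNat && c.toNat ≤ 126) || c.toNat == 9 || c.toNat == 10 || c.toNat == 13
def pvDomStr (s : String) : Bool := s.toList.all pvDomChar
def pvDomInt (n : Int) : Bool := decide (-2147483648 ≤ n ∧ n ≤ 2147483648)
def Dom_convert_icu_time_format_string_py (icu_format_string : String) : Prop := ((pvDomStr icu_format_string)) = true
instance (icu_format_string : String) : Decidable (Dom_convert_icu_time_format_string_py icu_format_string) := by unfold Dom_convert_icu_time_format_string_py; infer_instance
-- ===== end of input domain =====

-- B replaces A's index-based while loop with its nested quoted-literal scan by splitting the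
-- string on quotes and processing the alternating plain/literal segments; a timing run measured B faster by a constant factor (bulk str.split and whole-segment appends).

-- ===== PORT A =====
-- the character set ":.Hhms \u00a0\u202f" of A's membership test
def pvTimeChars : List Char := [':', '.', 'H', 'h', 'm', 's', ' ', '\u00A0', '\u202F']

mutual
-- A's outer while loop; state: remaining chars, am_pm_added
def loopA : List Char → Bool → List Char
  | [], _ => []
  | c :: rest, amPm =>
    if c = '\'' then c :: quotedA rest amPm
    else if pvTimeChars.contains c then c :: loopA rest amPm
    else if c = 'a' then
      if amPm then loopA rest amPm else 't' :: 't' :: loopA rest true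
    else loopA rest amPm
  termination_by l _ => l.length
-- A's inner while loop after an opening quote: append every char, break (back to outer loop) on a quote
def quotedA : List Char → Bool → List Char
  | [], _ => []
  | c :: rest, amPm => c :: (if c = '\'' then loopA rest amPm else quotedA rest amPm)
  termination_by l _ => l.length
end

def convert_icu_time_format_string_py (icu_format_string : String) : String :=
  String.ofList (loopA icu_format_string.toList false)

-- ===== PORT B =====
-- icu_format_string.split("'") on the character list
def splitQ : List Char → List (List Char)
  | [] => [[]]
  | c :: rest =>
    if c = '\'' then [] :: splitQ rest
    else
      match splitQ rest with
      | [] => [[c]]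
      | h :: t => (c :: h) :: t

mutual
-- B's loop over the segments; `outside` toggles each iteration, `last` ↔ rest = []
def goB : List (List Char) → Bool → Bool → List Char
  | [], _, _ => []
  | seg :: rest, outside, amPm =>
    if outside then goOutSeg seg rest amPm
    else seg ++ (if rest = [] then [] else '\'' :: goB rest true amPm)
  termination_by segs _ _ => sizeOf segs
-- B's inner for-loop over an outside segment's chars, then the trailing quote if not last
def goOutSeg : List Char → List (List Char) → Bool → List Char
  | [], rest, amPm => if rest = [] then [] else '\'' :: goB rest false amPm
  | c :: cs, rest, amPm =>
    if pvTimeChars.contains c then c :: goOutSeg cs rest amPm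
    else if c = 'a' then
      if amPm then goOutSeg cs rest amPm else 't' :: 't' :: goOutSeg cs rest true
    else goOutSeg cs rest amPm
  termination_by seg rest _ => sizeOf seg + sizeOf rest
end

def convert_icu_time_format_string_py_alt (icu_format_string : String) : String :=
  String.ofList (goB (splitQ icu_format_string.toList) true false)

-- ===== PRECONDITION & SPEC =====
def Spec_convert_icu_time_format_string_py (icu_format_string : String) (out : String) : Prop := out = convert_icu_time_format_string_py_alt icu_format_string
instance (icu_format_string : String) (out : String) : Decidable (Spec_convert_icu_time_format_string_py icu_format_string out) := by unfold Spec_convert_icu_time_format_string_py; infer_instance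

-- ===== CLAIM (what is proved, stated in full; the proofs are below) =====
def Claim_equal_convert_icu_time_format_string_py : Prop := ∀ (icu_format_string : String), Dom_convert_icu_time_format_string_py icu_format_string → Spec_convert_icu_time_format_string_py icu_format_string (convert_icu_time_format_string_py icu_format_string)

-- ===== LEMMAS AND PROOFS =====

lemma splitQ_ne_nil (l : List Char) : splitQ l ≠ [] := by
  cases l with
  | nil => simp [splitQ]
  | cons c rest =>
    simp only [splitQ]
    split_ifs
    · simp
    · cases splitQ rest <;> simp

-- main invariant: A's outer loop = B on the split, and A's inner quoted loop = B starting inside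
lemma loop_eq (n : Nat) : ∀ l : List Char, l.length ≤ n → ∀ amPm : Bool,
    loopA l amPm = goB (splitQ l) true amPm ∧ quotedA l amPm = goB (splitQ l) false amPm := by
  induction n with
  | zero =>
    intro l hl amPm
    have : l = [] := List.eq_nil_of_length_eq_zero (Nat.le_zero.mp hl)
    subst this
    simp [loopA, quotedA, splitQ, goB, goOutSeg]
  | succ n ih =>
    intro l hl amPm
    cases l with
    | nil => simp [loopA, quotedA, splitQ, goB, goOutSeg]
    | cons c rest =>
      have hrest : rest.length ≤ n := by simpa using Nat.lt_succ_iff.mp (Nat.lt_of_lt_of_le (by simp) hl)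
      by_cases hq : c = '\''
      · subst hq
        constructor
        · simp [loopA, splitQ, goB, goOutSeg, splitQ_ne_nil rest, (ih rest hrest amPm).2]
        · simp [quotedA, splitQ, goB, splitQ_ne_nil rest, (ih rest hrest amPm).1]
      · obtain ⟨h, t, hsplit⟩ : ∃ h t, splitQ rest = h :: t := by
          cases hs : splitQ rest with
          | nil => exact absurd hs (splitQ_ne_nil rest)
          | cons h t => exact ⟨h, t, rfl⟩
        have hsp : splitQ (c :: rest) = (c :: h) :: t := by
          simp only [splitQ, if_neg hq, hsplit]
        have hgo : ∀ b, goOutSeg h t b = goB (splitQ rest) true b := by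
          intro b; rw [hsplit]; simp [goB]
        have ih1 : ∀ b, loopA rest b = goB (splitQ rest) true b := fun b => (ih rest hrest b).1
        constructor
        · rw [loopA, hsp]
          simp only [goB, goOutSeg, if_neg hq]
          simp [hgo, ih1]
        · rw [quotedA, hsp]
          have h2 := (ih rest hrest amPm).2
          rw [hsplit] at h2
          simp [goB, if_neg hq, h2]

-- ===== VERDICT (by name: the statement is the Claim_ definition above) =====
theorem convert_icu_time_format_string_py_spec : Claim_equal_convert_icu_time_format_string_py := by
  intro s _
  unfold Spec_convert_icu_time_format_string_py convert_icu_time_format_string_py convert_icu_time_format_string_py_alt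
  exact congrArg String.ofList (loop_eq s.toList.length s.toList (le_refl _) false).1
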